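-- pv_equiv track=rewrite | github.com/Arsen1302/Code-copy-detector | TestData/solutions/problem_1651_3.py | solution_1651_3
-- ===== SOURCE A (Python) =====
-- from typing import List
--
-- def solution_1651_3(nums: List[int], queries: List[int]) -> List[int]:
--     answer = [0] * len(queries)
--     for id, query in enumerate(queries):
--         spec_sum = 0
--         for i, number in enumerate(sorted(nums)):
--             spec_sum += number
--
--             if spec_sum <= query:
--                 answer[id] += 1
--             else:
--                 break
--
--     return answer
-- ===== SOURCE B (Python) =====
-- def solution_1651_3(nums, queries):
--     # Sort once, build running maxima of prefix sums (nondecreasing),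
--     # then answer each query with a binary search on that array.
--     s = sorted(nums)
--     mx = []
--     run = 0
--     m = None
--     for x in s:
--         run += x
--         m = run if (m is None or run > m) else m
--         mx.append(m)
--     out = []
--     for q in queries:
--         lo, hi = 0, len(mx)
--         while lo < hi:
--             mid = (lo + hi) // 2
--             if mx[mid] <= q:
--                 lo = mid + 1
--             else:
--                 hi = mid
--         out.append(lo)
--     return out
-- ===== Notes on version B (the rewrite author's own statement) =====
-- stated objective: faster
-- what changed: B sorts once and precomputes the running maxima of prefix sums, then answers each query with a hand-written binary search, instead of A's re-sorting nums and re-accumulating the prefix sums for every query.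
import Mathlib
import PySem

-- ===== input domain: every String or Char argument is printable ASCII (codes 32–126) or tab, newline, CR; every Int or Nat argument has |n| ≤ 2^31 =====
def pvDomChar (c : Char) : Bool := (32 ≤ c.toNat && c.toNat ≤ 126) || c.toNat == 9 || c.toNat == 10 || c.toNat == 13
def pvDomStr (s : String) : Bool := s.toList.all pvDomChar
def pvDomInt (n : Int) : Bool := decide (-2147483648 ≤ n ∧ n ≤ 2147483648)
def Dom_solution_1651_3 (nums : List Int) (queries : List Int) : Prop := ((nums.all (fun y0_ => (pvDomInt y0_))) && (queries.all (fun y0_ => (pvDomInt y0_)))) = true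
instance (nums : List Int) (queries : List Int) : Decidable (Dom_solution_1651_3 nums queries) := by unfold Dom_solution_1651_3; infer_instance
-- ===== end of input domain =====

-- B sorts once and precomputes the running maxima of prefix sums, then answers each
-- query with a binary search; A re-sorts and re-scans nums for every query (return
-- values proved equal; neither mutates its arguments).

-- ===== PORT A =====
-- inner loop of A: spec_sum accumulator `s`, counter `cnt` (answer[id]), break → return cnt
def pvLoopA (q : Int) : List Int → Int → Int → Int
  | [], _, cnt => cnt
  | x :: xs, s, cnt =>
      let s' := s + x
      if s' ≤ q then pvLoopA q xs s' (cnt + 1) else cnt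

def solution_1651_3 (nums : List Int) (queries : List Int) : List Int :=
  queries.map (fun query => pvLoopA query (PySem.List.sorted nums (fun x => x) false) 0 0)

-- ===== PORT B =====
-- mx-building loop of B: running sum `run`, current max `m` (None before the first element)
def pvBuildMx : List Int → Int → Option Int → List Int
  | [], _, _ => []
  | x :: xs, run, m =>
      let run' := run + x
      let m' := match m with
        | none => run'
        | some mm => if run' > mm then run' else mm
      m' :: pvBuildMx xs run' (some m')

-- binary-search loop of B (mx[mid] via getD; mid is always in range when 0 ≤ lo < hi ≤ len mx)
def pvBisect (mx : List Int) (q : Int) (lo hi : Nat) : Nat :=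
  if h : lo < hi then
    let mid := (lo + hi) / 2
    if mx.getD mid 0 ≤ q then pvBisect mx q (mid + 1) hi
    else pvBisect mx q lo mid
  else lo
termination_by hi - lo
decreasing_by all_goals omega

def solution_1651_3_alt (nums : List Int) (queries : List Int) : List Int :=
  let s := PySem.List.sorted nums (fun x => x) false
  let mx := pvBuildMx s 0 none
  queries.map (fun q => (pvBisect mx q 0 mx.length : Int))

-- ===== PRECONDITION & SPEC =====
def Spec_solution_1651_3 (nums : List Int) (queries : List Int) (out : List Int) : Prop := out = solution_1651_3_alt nums queries
instance (nums : List Int) (queries : List Int) (out : List Int) : Decidable (Spec_solution_1651_3 nums queries out) := by unfold Spec_solution_1651_3; infer_instance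

-- ===== CLAIM (what is proved, stated in full; the proofs are below) =====
def Claim_equal_solution_1651_3 : Prop := ∀ (nums : List Int) (queries : List Int), Dom_solution_1651_3 nums queries → Spec_solution_1651_3 nums queries (solution_1651_3 nums queries)

-- ===== LEMMAS AND PROOFS =====

-- every element of pvBuildMx xs run (some m) is ≥ m
theorem pvBuildMx_ge (xs : List Int) : ∀ (run m y : Int),
    y ∈ pvBuildMx xs run (some m) → m ≤ y := by
  induction xs with
  | nil => intro run m y h; simp [pvBuildMx] at h
  | cons x xs ih =>
      intro run m y h
      simp only [pvBuildMx, List.mem_cons] at h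
      rcases h with h | h
      · subst h; split <;> omega
      · have := ih (run + x) _ y h
        split at this <;> omega

-- pvBuildMx produces a nondecreasing list
theorem pvBuildMx_pairwise (xs : List Int) : ∀ (run : Int) (m : Option Int),
    (pvBuildMx xs run m).Pairwise (· ≤ ·) := by
  induction xs with
  | nil => intro run m; simp [pvBuildMx]
  | cons x xs ih =>
      intro run m
      simp only [pvBuildMx]
      refine List.pairwise_cons.mpr ⟨?_, ih _ _⟩
      intro y hy
      exact pvBuildMx_ge xs _ _ y hy

-- A's inner loop counts the ≤-q prefix of the running-max list
theorem pvLoopA_takeWhile (q : Int) (xs : List Int) : ∀ (s cnt : Int) (m : Option Int),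
    (∀ mm, m = some mm → mm ≤ q) →
    pvLoopA q xs s cnt = cnt + ((pvBuildMx xs s m).takeWhile (fun v => v ≤ q)).length := by
  induction xs with
  | nil => intro s cnt m _; simp [pvLoopA, pvBuildMx]
  | cons x xs ih =>
      intro s cnt m hm
      rcases m with _ | mm
      · -- m = none: head of mx is s + x itself
        simp only [pvLoopA, pvBuildMx]
        by_cases hle : s + x ≤ q
        · rw [if_pos hle, List.takeWhile_cons_of_pos (by simpa using hle)]
          rw [ih (s + x) (cnt + 1) (some (s + x)) (by intro mm hmm; injection hmm with h; omega)]
          simp; omega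
        · rw [if_neg hle, List.takeWhile_cons_of_neg (by simpa using hle)]
          simp
      · -- m = some mm with mm ≤ q: head is max mm (s + x)
        have hmm : mm ≤ q := hm mm rfl
        simp only [pvLoopA, pvBuildMx]
        by_cases hle : s + x ≤ q
        · have hpos : (if s + x > mm then s + x else mm) ≤ q := by split <;> omega
          rw [if_pos hle, List.takeWhile_cons_of_pos (by simpa using hpos)]
          rw [ih (s + x) (cnt + 1) (some (if s + x > mm then s + x else mm))
                (by intro m2 hm2; injection hm2 with h; split at h <;> omega)]
          simp; omega
        · have hneg : ¬ (if s + x > mm then s + x else mm) ≤ q := by split <;> omega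
          rw [if_neg hle, List.takeWhile_cons_of_neg (by simpa using hneg)]
          simp

-- takeWhile length from the two boundary facts (on any list)
theorem takeWhile_len_eq (q : Int) : ∀ (mx : List Int) (k : Nat),
    k ≤ mx.length →
    (∀ i, i < k → mx.getD i 0 ≤ q) →
    (∀ i, k ≤ i → i < mx.length → q < mx.getD i 0) →
    (mx.takeWhile (fun v => v ≤ q)).length = k := by
  intro mx
  induction mx with
  | nil => intro k hk _ _; simp at hk ⊢; omega
  | cons x t ih =>
      intro k hk hlo hhi
      cases k with
      | zero =>
          have hx : q < x := by
            have := hhi 0 (Nat.le_refl 0) (by simp)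
            simpa using this
          rw [List.takeWhile_cons_of_neg (by simp; omega)]
          simp
      | succ k' =>
          have hx : x ≤ q := by
            have := hlo 0 (Nat.succ_pos k')
            simpa using this
          rw [List.takeWhile_cons_of_pos (by simpa using hx)]
          simp only [List.length_cons]
          congr 1
          refine ih k' (by simpa using hk) ?_ ?_
          · intro i hi
            have := hlo (i + 1) (by omega)
            simpa using this
          · intro i hi hlen
            have := hhi (i + 1) (by omega) (by simpa using Nat.succ_lt_succ hlen)
            simpa using this

-- sortedness transported to getD indices
theorem getD_mono (mx : List Int) (hp : mx.Pairwise (· ≤ ·)) :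
    ∀ i j, i ≤ j → j < mx.length → mx.getD i 0 ≤ mx.getD j 0 := by
  intro i j hij hj
  rcases Nat.eq_or_lt_of_le hij with rfl | hlt
  · exact le_refl _
  · have hi : i < mx.length := lt_trans hlt hj
    rw [List.getD_eq_getElem mx 0 hi, List.getD_eq_getElem mx 0 hj]
    exact List.pairwise_iff_getElem.mp hp i j hi hj hlt

-- binary-search invariant: pvBisect finds the takeWhile length
theorem pvBisect_correct (mx : List Int) (q : Int) (hp : mx.Pairwise (· ≤ ·)) :
    ∀ (n lo hi : Nat), hi - lo = n → lo ≤ hi → hi ≤ mx.length →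
    (∀ i, i < lo → mx.getD i 0 ≤ q) →
    (∀ i, hi ≤ i → i < mx.length → q < mx.getD i 0) →
    pvBisect mx q lo hi = (mx.takeWhile (fun v => v ≤ q)).length := by
  intro n
  induction n using Nat.strong_induction_on with
  | _ n ih =>
      intro lo hi hn hle hhi hlow hhigh
      rw [pvBisect]
      by_cases h : lo < hi
      · rw [dif_pos h]
        set mid := (lo + hi) / 2 with hmid
        have hmlo : lo ≤ mid := by omega
        have hmhi : mid < hi := by omega
        have hmlen : mid < mx.length := by omega
        by_cases hq : mx.getD mid 0 ≤ q
        · rw [if_pos hq]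
          refine ih (hi - (mid + 1)) (by omega) (mid + 1) hi rfl (by omega) hhi ?_ hhigh
          intro i hi'
          by_cases hilo : i < lo
          · exact hlow i hilo
          · exact le_trans (getD_mono mx hp i mid (by omega) hmlen) hq
        · rw [if_neg hq]
          refine ih (mid - lo) (by omega) lo mid rfl (by omega) (by omega) hlow ?_
          intro i hi' hlen
          exact lt_of_not_ge fun hcon =>
            hq (le_trans (getD_mono mx hp mid i hi' hlen) hcon)
      · rw [dif_neg h]
        have : lo = hi := by omega
        subst this
        exact (takeWhile_len_eq q mx lo hhi hlow hhigh).symm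

-- per-query equality
theorem per_query (xs : List Int) (q : Int) :
    pvLoopA q xs 0 0 = ((pvBisect (pvBuildMx xs 0 none) q 0 (pvBuildMx xs 0 none).length : Nat) : Int) := by
  have h1 := pvLoopA_takeWhile q xs 0 0 none (by intro mm h; cases h)
  have h2 := pvBisect_correct (pvBuildMx xs 0 none) q (pvBuildMx_pairwise xs 0 none)
      ((pvBuildMx xs 0 none).length - 0) 0 (pvBuildMx xs 0 none).length rfl
      (Nat.zero_le _) (Nat.le_refl _)
      (by intro i hi; omega)
      (by intro i hi hlen; omega)
  rw [h2, h1]; simp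

-- ===== VERDICT (by name: the statement is the Claim_ definition above) =====
theorem solution_1651_3_spec : Claim_equal_solution_1651_3 := by
  intro nums queries _
  unfold Spec_solution_1651_3 solution_1651_3 solution_1651_3_alt
  simp only []
  exact List.map_congr_left fun q _ => per_query (PySem.List.sorted nums (fun x => x) false) q
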